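-- pv_equiv track=rewrite | github.com/kiyotone/Yet2BNamed | Yet2BNamed/images/gameFunctions.py | redable
-- ===== SOURCE A (Python) =====
-- def redable(string):
-- 	lis = []
-- 	q =0
-- 	e=""
-- 	for x in range(2,len(string)):
-- 		e+=string[x]
--
--
-- 	temp = ""
-- 	for x in range(2,len(e)-1):
-- 		if e[x]== " ":
-- 			for z in range(q,x):
-- 				temp+=e[z]
-- 			q=x+1
-- 			lis.append(temp)
-- 			temp =""
-- 	return lis
-- ===== SOURCE B (Python) =====
-- def redable(string):
--     e = string[2:]
--     n = len(e)
--     positions = [x for x in range(2, n - 1) if e[x] == " "]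
--     lis = []
--     prev = 0
--     for p in positions:
--         lis.append(e[prev:p])
--         prev = p + 1
--     return lis
-- ===== Notes on version B (the rewrite author's own statement) =====
-- stated objective: simpler
-- what changed: A's single stateful scan with a nested character-by-character copy loop is replaced by two separate passes: first build the table of delimiter positions in range(2, len(e)-1), then walk it slicing e[prev:p] between consecutive positions.
import Mathlib
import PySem

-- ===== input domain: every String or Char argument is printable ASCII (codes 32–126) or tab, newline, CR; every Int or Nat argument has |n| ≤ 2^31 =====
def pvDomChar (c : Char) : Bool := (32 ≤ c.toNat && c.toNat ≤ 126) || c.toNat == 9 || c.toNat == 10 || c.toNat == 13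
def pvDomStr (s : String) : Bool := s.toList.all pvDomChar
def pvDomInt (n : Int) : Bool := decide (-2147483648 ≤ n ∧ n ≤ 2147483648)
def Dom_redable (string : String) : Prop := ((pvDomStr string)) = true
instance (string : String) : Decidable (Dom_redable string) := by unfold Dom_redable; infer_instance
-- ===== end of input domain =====

-- B replaces A's single stateful scan (with its nested character-copying loop) by two passes:
-- a delimiter-position table built first, then slicing between consecutive positions; objective: simpler.

-- ===== PORT A =====
def redableStepA (e : List Char) (s : List (List Char) × Int × List Char) (x : Int) :
    List (List Char) × Int × List Char :=
  if PySem.List.pyGet? e x == some ' ' then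
    let temp := (PySem.List.pyRange s.2.1 x 1).foldl
      (fun t z => t ++ (PySem.List.pyGet? e z).toList) s.2.2
    (s.1 ++ [temp], x + 1, [])
  else s

def redable (string : String) : List String :=
  let cs := string.toList
  let e : List Char := (PySem.List.pyRange 2 (cs.length : Int) 1).foldl
    (fun acc x => acc ++ (PySem.List.pyGet? cs x).toList) []
  let r := (PySem.List.pyRange 2 ((e.length : Int) - 1) 1).foldl (redableStepA e) ([], 0, ([] : List Char))
  r.1.map String.ofList

-- ===== PORT B =====
def redable_alt (string : String) : List String :=
  let cs := string.toList
  let e := PySem.List.slice cs (some 2) none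
  let n : Int := e.length
  let positions := (PySem.List.pyRange 2 (n - 1) 1).filter
    (fun x => PySem.List.pyGet? e x == some ' ')
  let r := positions.foldl
    (fun (s : List (List Char) × Int) p =>
      (s.1 ++ [PySem.List.slice e (some s.2) (some p)], p + 1)) ([], 0)
  r.1.map String.ofList

-- ===== PRECONDITION & SPEC =====
def Spec_redable (string : String) (out : List String) : Prop := out = redable_alt string
instance (string : String) (out : List String) : Decidable (Spec_redable string out) := by unfold Spec_redable; infer_instance

-- ===== CLAIM (what is proved, stated in full; the proofs are below) =====
def Claim_equal_redable : Prop := ∀ (string : String), Dom_redable string → Spec_redable string (redable string)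

-- ===== LEMMAS AND PROOFS =====

-- copying e[j+k] for k < m yields (e.drop j).take m
lemma flatMap_range_getElem (e : List Char) (j m : Nat) :
    (List.range m).flatMap (fun k => e[j + k]?.toList) = (e.drop j).take m := by
  induction m with
  | zero => simp
  | succ m ih =>
    rw [List.range_succ, List.flatMap_append, ih, List.take_add_one]
    simp [List.getElem?_drop]

-- A's inner character-copying loop from an empty temp is a slice
lemma inner_loop_eq_slice (e : List Char) (q x : Int) (hq : 0 ≤ q) (hx : 0 ≤ x) :
    (PySem.List.pyRange q x 1).foldl
      (fun t z => t ++ (PySem.List.pyGet? e z).toList) [] =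
    PySem.List.slice e (some q) (some x) := by
  rw [PySem.List.foldl_append_eq_flatMap, PySem.List.slice_toNat _ hq hx,
    PySem.List.pyRange_one, List.flatMap_map]
  have h1 : ∀ k : Nat, PySem.List.pyGet? e (q + (k : Int)) = e[q.toNat + k]? := by
    intro k
    have : q + (k : Int) = ((q.toNat + k : Nat) : Int) := by omega
    rw [this, PySem.List.pyGet?_natCast]
  have h2 : (x - q).toNat = x.toNat - q.toNat := by omega
  simp only [List.nil_append, h1, h2]
  exact flatMap_range_getElem e q.toNat _

-- A's first loop builds string[2:]
lemma buildE_eq_drop (cs : List Char) :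
    (PySem.List.pyRange 2 (cs.length : Int) 1).foldl
      (fun acc x => acc ++ (PySem.List.pyGet? cs x).toList) [] = cs.drop 2 := by
  have := inner_loop_eq_slice cs 2 (cs.length : Int) (by omega) (by omega)
  rw [this, PySem.List.slice_toNat _ (by omega) (by omega)]
  simp

-- A's guarded fold over the index range equals B's fold over the filtered position table
lemma folds_agree (e : List Char) (xs : List Int) (hxs : ∀ x ∈ xs, 0 ≤ x)
    (l : List (List Char)) (q : Int) (hq : 0 ≤ q) :
    (xs.foldl (redableStepA e) (l, q, ([] : List Char))).1 =
    ((xs.filter (fun x => PySem.List.pyGet? e x == some ' ')).foldl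
      (fun (s : List (List Char) × Int) p =>
        (s.1 ++ [PySem.List.slice e (some s.2) (some p)], p + 1)) (l, q)).1 := by
  induction xs generalizing l q with
  | nil => rfl
  | cons x xs ih =>
    have hx : 0 ≤ x := hxs x (by simp)
    have hmem : ∀ x' ∈ xs, 0 ≤ x' := fun x' h => hxs x' (by simp [h])
    by_cases hgate : PySem.List.pyGet? e x == some ' '
    · simp only [List.foldl_cons, List.filter_cons, hgate, if_pos, redableStepA]
      rw [inner_loop_eq_slice e q x hq hx]
      exact ih hmem _ (x + 1) (by omega)
    · simp only [List.foldl_cons, List.filter_cons, hgate, redableStepA,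
        Bool.false_eq_true]
      exact ih hmem l q hq

-- ===== VERDICT (by name: the statement is the Claim_ definition above) =====
theorem redable_spec : Claim_equal_redable := by
  intro s _
  unfold Spec_redable redable redable_alt
  simp only
  rw [buildE_eq_drop]
  have hE : PySem.List.slice s.toList (some 2) none = s.toList.drop 2 := by
    rw [PySem.List.slice_from _ (by omega)]; rfl
  rw [hE]
  set e := s.toList.drop 2 with he
  have hxs : ∀ x ∈ PySem.List.pyRange 2 ((e.length : Int) - 1) 1, 0 ≤ x := by
    intro x hx
    have := (PySem.List.mem_pyRange_one).1 hx
    omega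
  rw [folds_agree e _ hxs [] 0 (by omega)]
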